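-- pv_equiv track=rewrite | github.com/avijit-thawani/mandarin | analysis/quiz_ml_model.py | compute_attempt_numbers
-- ===== SOURCE A (Python) =====
-- from collections import defaultdict
--
-- def compute_attempt_numbers(data):
--     """Compute per-concept attempt number (nth time this word was tested).
--     Data must be sorted by created_at."""
--     counters = defaultdict(int)
--     attempt_nums = []
--     for d in data:
--         vid = d.get('vocabulary_id', '')
--         counters[vid] += 1
--         attempt_nums.append(counters[vid])
--     return attempt_nums
-- ===== SOURCE B (Python) =====
-- def compute_attempt_numbers(data):
--     """Compute per-concept attempt number (nth time this word was tested).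
--     Data must be sorted by created_at."""
--     keys = [d.get('vocabulary_id', '') for d in data]
--     return [keys[:i + 1].count(keys[i]) for i in range(len(keys))]
-- ===== Notes on version B (the rewrite author's own statement) =====
-- stated objective: simpler
-- what changed: Replaced the running defaultdict counter with a stateless prefix count: each attempt number is the count of the current vocabulary_id in the inclusive prefix, as one list comprehension.
import Mathlib
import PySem

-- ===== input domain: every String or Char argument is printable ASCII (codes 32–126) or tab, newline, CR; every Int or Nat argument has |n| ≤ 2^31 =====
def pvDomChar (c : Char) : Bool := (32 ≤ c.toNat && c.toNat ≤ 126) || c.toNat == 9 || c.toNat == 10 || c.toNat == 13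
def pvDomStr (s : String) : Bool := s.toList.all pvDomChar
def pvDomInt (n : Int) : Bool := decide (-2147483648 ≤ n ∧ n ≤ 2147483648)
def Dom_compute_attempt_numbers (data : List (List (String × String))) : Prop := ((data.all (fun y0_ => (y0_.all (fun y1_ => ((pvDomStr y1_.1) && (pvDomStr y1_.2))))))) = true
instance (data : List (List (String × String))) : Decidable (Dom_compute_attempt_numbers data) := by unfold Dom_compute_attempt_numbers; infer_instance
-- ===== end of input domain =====

-- B replaces A's running dict counter with a stateless inclusive-prefix count per element (same result, different decomposition).
-- ===== PORT A =====
-- d.get('vocabulary_id', ''): first match in the association list, default '' (exact for Python dicts, whose keys are unique).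
def pvVid (d : List (String × String)) : String :=
  ((d.find? (fun p => p.1 == "vocabulary_id")).map (fun p => p.2)).getD ""

def compute_attempt_numbers (data : List (List (String × String))) : List Int :=
  (data.foldl (fun (st : PySem.Dict String Int × List Int) d =>
      let vid := pvVid d
      let counters := st.1.modify vid 0 (· + 1)
      (counters, st.2 ++ [counters.getD vid 0]))
    (PySem.Dict.empty, [])).2

-- ===== PORT B =====
def compute_attempt_numbers_alt (data : List (List (String × String))) : List Int :=
  let keys := data.map pvVid
  (PySem.List.pyRange 0 keys.length 1).map (fun i =>
    (PySem.List.slice keys none (some (i + 1))).count (PySem.List.pyGetD keys i ""))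

-- ===== PRECONDITION & SPEC =====
def Spec_compute_attempt_numbers (data : List (List (String × String))) (out : List Int) : Prop := out = compute_attempt_numbers_alt data
instance (data : List (List (String × String))) (out : List Int) : Decidable (Spec_compute_attempt_numbers data out) := by unfold Spec_compute_attempt_numbers; infer_instance

-- ===== CLAIM (what is proved, stated in full; the proofs are below) =====
def Claim_equal_compute_attempt_numbers : Prop := ∀ (data : List (List (String × String))), Dom_compute_attempt_numbers data → Spec_compute_attempt_numbers data (compute_attempt_numbers data)

-- ===== LEMMAS AND PROOFS =====
-- A's loop body, as a function of the key only
def pvG (st : PySem.Dict String Int × List Int) (k : String) : PySem.Dict String Int × List Int :=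
  let counters := st.1.modify k 0 (· + 1)
  (counters, st.2 ++ [counters.getD k 0])

lemma A_eq (data : List (List (String × String))) :
    compute_attempt_numbers data = (((data.map pvVid).foldl pvG (PySem.Dict.empty, []))).2 := by
  simp [compute_attempt_numbers, pvG, List.foldl_map]

lemma fst_pvG (keys : List String) (d : PySem.Dict String Int) (acc : List Int) :
    (keys.foldl pvG (d, acc)).1 = keys.foldl (fun c k => c.modify k 0 (· + 1)) d := by
  induction keys generalizing d acc with
  | nil => rfl
  | cons k rest ih => simp [List.foldl, pvG, ih]

lemma key_loop (keys : List String) :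
    (keys.foldl pvG (PySem.Dict.empty, [])).2 =
      (List.range keys.length).map (fun i => (((keys.take (i + 1)).count (keys.getD i "")) : Int)) := by
  induction keys using List.reverseRecOn with
  | nil => rfl
  | append_singleton keys k ih =>
      rw [List.foldl_append]
      have hsnd : (List.foldl pvG (List.foldl pvG (PySem.Dict.empty, []) keys) [k]).2 =
          (List.foldl pvG (PySem.Dict.empty, []) keys).2 ++
            [((List.foldl pvG (PySem.Dict.empty, []) keys).1.modify k 0 (· + 1)).getD k 0] := by
        simp [pvG]
      rw [hsnd, ih, fst_pvG]
      have hcnt : ((List.foldl (fun c k => c.modify k 0 (· + 1)) PySem.Dict.empty keys).modify k 0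
          (· + 1)).getD k 0 = ((keys ++ [k]).count k : Int) := by
        have := PySem.Dict.getD_foldl_modify_add_one (keys ++ [k]) PySem.Dict.empty k
        rw [List.foldl_append] at this
        simpa using this
      rw [hcnt]
      rw [List.length_append, List.length_singleton, List.range_succ, List.map_append]
      have hget : (keys ++ [k]).getD keys.length "" = k := by
        simp [List.getD]
      have htake : (keys ++ [k]).take (keys.length + 1) = keys ++ [k] := by
        rw [show keys.length + 1 = (keys ++ [k]).length by simp, List.take_length]
      congr 1
      · apply List.map_congr_left
        intro i hi
        rw [List.mem_range] at hi
        rw [List.getD_append _ _ _ _ hi, List.take_append_of_le_length (by omega)]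
      · simp [htake]

lemma B_eq (data : List (List (String × String))) :
    compute_attempt_numbers_alt data =
      (List.range (data.map pvVid).length).map
        (fun i => ((((data.map pvVid).take (i + 1)).count ((data.map pvVid).getD i "")) : Int)) := by
  simp only [compute_attempt_numbers_alt]
  rw [PySem.List.pyRange_zero_natCast, List.map_map]
  apply List.map_congr_left
  intro i _
  simp only [Function.comp_apply, PySem.List.pyGetD_natCast]
  rw [show ((i : Int) + 1) = ((i + 1 : Nat) : Int) by push_cast; ring,
    PySem.List.slice_to_natCast]

-- ===== VERDICT (by name: the statement is the Claim_ definition above) =====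
theorem compute_attempt_numbers_spec : Claim_equal_compute_attempt_numbers := by
  intro data _
  show compute_attempt_numbers data = compute_attempt_numbers_alt data
  rw [A_eq, key_loop, B_eq]
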